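-- pv_equiv track=rewrite | github.com/MaksimXing/FlexFair | Code/F_Polyp_and_Cervical_Cancer/src/FedBasicFunc/FedTestPrivate.py | ThroughDict
-- ===== SOURCE A (Python) =====
-- def ThroughDict(dict_pred, xx_dict_A, pred, pred_xx, pred_Aeq0, pred_Aeq0_xx, pred_Aeq1, pred_Aeq1_xx):
--     for name_key, res in dict_pred.items():
--         try:
--             A_value = xx_dict_A[name_key]
--         except KeyError:
--             continue
--         pred.append(res)
--         pred_xx.append(res)
--         if A_value == 0:
--             pred_Aeq0.append(res)
--             pred_Aeq0_xx.append(res)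
--         elif A_value == 1:
--             pred_Aeq1.append(res)
--             pred_Aeq1_xx.append(res)
--     return pred, pred_xx, pred_Aeq0, pred_Aeq0_xx, pred_Aeq1, pred_Aeq1_xx
-- ===== SOURCE B (Python) =====
-- def ThroughDict(dict_pred, xx_dict_A, pred, pred_xx, pred_Aeq0, pred_Aeq0_xx, pred_Aeq1, pred_Aeq1_xx):
--     # Build an (attribute, result) index once, then fill each output with its own filtered pass.
--     items = [(xx_dict_A[k], res) for k, res in dict_pred.items() if k in xx_dict_A]
--     pred.extend(r for _, r in items)
--     pred_xx.extend(r for _, r in items)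
--     pred_Aeq0.extend(r for a, r in items if a == 0)
--     pred_Aeq0_xx.extend(r for a, r in items if a == 0)
--     pred_Aeq1.extend(r for a, r in items if a == 1)
--     pred_Aeq1_xx.extend(r for a, r in items if a == 1)
--     return pred, pred_xx, pred_Aeq0, pred_Aeq0_xx, pred_Aeq1, pred_Aeq1_xx
-- ===== Notes on version B (the rewrite author's own statement) =====
-- stated objective: alternative
-- what changed: Replaces A's single interleaved loop (try/except lookup, conditional appends into six lists) with building an (attribute, result) index list once and then extending each of the six output lists in its own filtered pass.
import Mathlib
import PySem

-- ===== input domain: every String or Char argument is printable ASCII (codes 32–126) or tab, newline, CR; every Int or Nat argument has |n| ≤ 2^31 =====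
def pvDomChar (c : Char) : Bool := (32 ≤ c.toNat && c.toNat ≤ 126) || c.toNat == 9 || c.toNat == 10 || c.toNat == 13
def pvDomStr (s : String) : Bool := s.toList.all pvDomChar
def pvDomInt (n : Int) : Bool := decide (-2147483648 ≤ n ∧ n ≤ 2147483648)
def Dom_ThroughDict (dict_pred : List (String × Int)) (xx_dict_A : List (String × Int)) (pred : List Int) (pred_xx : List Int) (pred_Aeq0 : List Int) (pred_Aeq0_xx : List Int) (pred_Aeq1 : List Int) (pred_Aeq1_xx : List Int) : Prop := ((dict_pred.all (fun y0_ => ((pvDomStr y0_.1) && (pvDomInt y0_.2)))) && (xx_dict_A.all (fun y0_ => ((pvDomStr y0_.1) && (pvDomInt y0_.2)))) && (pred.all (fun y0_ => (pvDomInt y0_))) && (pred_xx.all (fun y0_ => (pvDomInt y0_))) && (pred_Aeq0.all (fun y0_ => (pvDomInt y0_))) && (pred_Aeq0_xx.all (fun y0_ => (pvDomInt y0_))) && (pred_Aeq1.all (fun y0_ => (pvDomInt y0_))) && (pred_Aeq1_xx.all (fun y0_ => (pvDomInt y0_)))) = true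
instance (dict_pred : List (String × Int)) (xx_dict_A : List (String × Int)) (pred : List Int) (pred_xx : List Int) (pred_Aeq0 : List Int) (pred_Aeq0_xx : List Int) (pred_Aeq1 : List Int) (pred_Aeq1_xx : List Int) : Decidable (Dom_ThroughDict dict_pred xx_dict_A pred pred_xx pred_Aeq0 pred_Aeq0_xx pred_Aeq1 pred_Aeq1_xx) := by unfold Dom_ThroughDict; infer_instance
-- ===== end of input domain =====

-- B rebuilds the six outputs by one index-building pass plus six filtered extends instead of
-- A's single interleaved loop; same cost, different decomposition. Equivalence is about return
-- values (both Pythons also mutate the six list arguments in place, identically).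

-- dict lookup (first match), shared by both ports: xx_dict_A[name_key] / 'k in xx_dict_A'
def pvLookup (d : List (String × Int)) (k : String) : Option Int :=
  (d.find? (fun p => p.1 == k)).map (·.2)

-- ===== PORT A =====
-- literal transliteration of A's for-loop: six accumulators threaded through the recursion
def ThroughDict (dict_pred : List (String × Int)) (xx_dict_A : List (String × Int)) (pred : List Int) (pred_xx : List Int) (pred_Aeq0 : List Int) (pred_Aeq0_xx : List Int) (pred_Aeq1 : List Int) (pred_Aeq1_xx : List Int) : List Int × List Int × List Int × List Int × List Int × List Int :=
  match dict_pred with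
  | [] => (pred, pred_xx, pred_Aeq0, pred_Aeq0_xx, pred_Aeq1, pred_Aeq1_xx)
  | (name_key, res) :: rest =>
    match pvLookup xx_dict_A name_key with
    | none => ThroughDict rest xx_dict_A pred pred_xx pred_Aeq0 pred_Aeq0_xx pred_Aeq1 pred_Aeq1_xx
    | some a_value =>
      if a_value = 0 then
        ThroughDict rest xx_dict_A (pred ++ [res]) (pred_xx ++ [res]) (pred_Aeq0 ++ [res]) (pred_Aeq0_xx ++ [res]) pred_Aeq1 pred_Aeq1_xx
      else if a_value = 1 then
        ThroughDict rest xx_dict_A (pred ++ [res]) (pred_xx ++ [res]) pred_Aeq0 pred_Aeq0_xx (pred_Aeq1 ++ [res]) (pred_Aeq1_xx ++ [res])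
      else
        ThroughDict rest xx_dict_A (pred ++ [res]) (pred_xx ++ [res]) pred_Aeq0 pred_Aeq0_xx pred_Aeq1 pred_Aeq1_xx

-- ===== PORT B =====
-- Source B: build items = [(A value, res)] once, then six filtered extends
def ThroughDict_alt (dict_pred : List (String × Int)) (xx_dict_A : List (String × Int)) (pred : List Int) (pred_xx : List Int) (pred_Aeq0 : List Int) (pred_Aeq0_xx : List Int) (pred_Aeq1 : List Int) (pred_Aeq1_xx : List Int) : List Int × List Int × List Int × List Int × List Int × List Int :=
  let items : List (Int × Int) :=
    dict_pred.filterMap (fun kr => (pvLookup xx_dict_A kr.1).map (fun a => (a, kr.2)))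
  (pred ++ items.map (·.2),
   pred_xx ++ items.map (·.2),
   pred_Aeq0 ++ (items.filter (fun p => p.1 == 0)).map (·.2),
   pred_Aeq0_xx ++ (items.filter (fun p => p.1 == 0)).map (·.2),
   pred_Aeq1 ++ (items.filter (fun p => p.1 == 1)).map (·.2),
   pred_Aeq1_xx ++ (items.filter (fun p => p.1 == 1)).map (·.2))

-- ===== PRECONDITION & SPEC =====
def Spec_ThroughDict (dict_pred : List (String × Int)) (xx_dict_A : List (String × Int)) (pred : List Int) (pred_xx : List Int) (pred_Aeq0 : List Int) (pred_Aeq0_xx : List Int) (pred_Aeq1 : List Int) (pred_Aeq1_xx : List Int) (out : List Int × List Int × List Int × List Int × List Int × List Int) : Prop := out = ThroughDict_alt dict_pred xx_dict_A pred pred_xx pred_Aeq0 pred_Aeq0_xx pred_Aeq1 pred_Aeq1_xx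
instance (dict_pred : List (String × Int)) (xx_dict_A : List (String × Int)) (pred : List Int) (pred_xx : List Int) (pred_Aeq0 : List Int) (pred_Aeq0_xx : List Int) (pred_Aeq1 : List Int) (pred_Aeq1_xx : List Int) (out : List Int × List Int × List Int × List Int × List Int × List Int) : Decidable (Spec_ThroughDict dict_pred xx_dict_A pred pred_xx pred_Aeq0 pred_Aeq0_xx pred_Aeq1 pred_Aeq1_xx out) := by unfold Spec_ThroughDict; infer_instance

-- ===== CLAIM (what is proved, stated in full; the proofs are below) =====
def Claim_equal_ThroughDict : Prop := ∀ (dict_pred : List (String × Int)) (xx_dict_A : List (String × Int)) (pred : List Int) (pred_xx : List Int) (pred_Aeq0 : List Int) (pred_Aeq0_xx : List Int) (pred_Aeq1 : List Int) (pred_Aeq1_xx : List Int), Dom_ThroughDict dict_pred xx_dict_A pred pred_xx pred_Aeq0 pred_Aeq0_xx pred_Aeq1 pred_Aeq1_xx → Spec_ThroughDict dict_pred xx_dict_A pred pred_xx pred_Aeq0 pred_Aeq0_xx pred_Aeq1 pred_Aeq1_xx (ThroughDict dict_pred xx_dict_A pred pred_xx pred_Aeq0 pred_Aeq0_xx pred_Aeq1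 pred_Aeq1_xx)

-- ===== LEMMAS AND PROOFS =====
theorem ThroughDict_eq_alt (dict_pred : List (String × Int)) (xx_dict_A : List (String × Int)) (pred : List Int) (pred_xx : List Int) (pred_Aeq0 : List Int) (pred_Aeq0_xx : List Int) (pred_Aeq1 : List Int) (pred_Aeq1_xx : List Int) :
    ThroughDict dict_pred xx_dict_A pred pred_xx pred_Aeq0 pred_Aeq0_xx pred_Aeq1 pred_Aeq1_xx
      = ThroughDict_alt dict_pred xx_dict_A pred pred_xx pred_Aeq0 pred_Aeq0_xx pred_Aeq1 pred_Aeq1_xx := by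
  induction dict_pred generalizing pred pred_xx pred_Aeq0 pred_Aeq0_xx pred_Aeq1 pred_Aeq1_xx with
  | nil => simp [ThroughDict, ThroughDict_alt]
  | cons kr rest ih =>
    obtain ⟨name_key, res⟩ := kr
    rw [ThroughDict]
    cases h : pvLookup xx_dict_A name_key with
    | none => simp [ThroughDict_alt, ih, h]
    | some a =>
      by_cases h0 : a = 0
      · simp [h0, ih, ThroughDict_alt, h]
      · by_cases h1 : a = 1
        · simp [h1, ih, ThroughDict_alt, h]
        · simp [h0, h1, ih, ThroughDict_alt, h]

-- ===== VERDICT (by name: the statement is the Claim_ definition above) =====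
theorem ThroughDict_spec : Claim_equal_ThroughDict := by
  intro dict_pred xx_dict_A pred pred_xx pred_Aeq0 pred_Aeq0_xx pred_Aeq1 pred_Aeq1_xx _
  exact ThroughDict_eq_alt dict_pred xx_dict_A pred pred_xx pred_Aeq0 pred_Aeq0_xx pred_Aeq1 pred_Aeq1_xx
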